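-- pv_equiv track=rewrite | github.com/zgwd666/-offer | 面试题40:最小的k个数/最小的k个数.py | inventoryManagement
-- ===== SOURCE A (Python) =====
-- from typing import List
--
-- def inventoryManagement(stock: List[int], cnt: int) -> List[int]:
--     if len(stock)<cnt or cnt==0:#判断特殊情况
--         return []
--     def quickSort(stock):#快排
--         if len(stock)<=1:#当列表中小于一个数字就不要排序直接返回
--             return stock
--         pivot=stock[0]#取数组的第一个元素为基准
--         less=[]#初始化小于数组和大于数组
--         greater=[]
--         for i in range(1,len(stock)):#遍历数组，将大于基准数的数字加入大于数组，其他数字加入小于数组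
--             if stock[i]>pivot:
--                 greater.append(stock[i])
--             else:
--                 less.append(stock[i])
--         return quickSort(less)+[pivot]+quickSort(greater)#递归进行排序
--     sortStock=quickSort(stock)#进行快排
--     return sortStock[:cnt]#然后取排序后的数组前cnt个数字即可
-- ===== SOURCE B (Python) =====
-- from typing import List
--
-- def inventoryManagement(stock: List[int], cnt: int) -> List[int]:
--     if len(stock) < cnt or cnt == 0:
--         return []
--     return sorted(stock)[:cnt]
-- ===== Notes on version B (the rewrite author's own statement) =====
-- stated objective: faster
-- what changed: Replaces the hand-rolled recursive quicksort (first-element pivot, building less/greater lists) with a single call to the built-in Timsort sorted(), then the same prefix slice.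
import Mathlib
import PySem

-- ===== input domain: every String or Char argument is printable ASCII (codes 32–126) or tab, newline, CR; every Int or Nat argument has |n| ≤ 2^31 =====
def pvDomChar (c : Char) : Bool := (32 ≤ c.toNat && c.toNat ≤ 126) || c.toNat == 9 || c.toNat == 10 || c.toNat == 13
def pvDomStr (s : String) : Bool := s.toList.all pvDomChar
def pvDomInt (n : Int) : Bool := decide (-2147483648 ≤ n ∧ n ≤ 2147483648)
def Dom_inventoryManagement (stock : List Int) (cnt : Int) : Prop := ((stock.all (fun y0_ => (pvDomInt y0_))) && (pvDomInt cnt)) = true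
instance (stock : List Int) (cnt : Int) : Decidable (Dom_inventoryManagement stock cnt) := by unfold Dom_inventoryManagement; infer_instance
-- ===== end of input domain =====

-- B replaces A's hand-rolled first-pivot quicksort with the built-in sort (PySem.List.sorted), then the same prefix slice; equivalence is exact on all inputs.


-- ===== PORT A =====
-- quickSort helper: first element as pivot; the tail splits into 'greater' (> pivot) and 'less' (the rest), recurse on both
def pvLess (pivot : Int) (rest : List Int) : List Int := rest.filter (fun x => !decide (pivot < x))
def pvGreater (pivot : Int) (rest : List Int) : List Int := rest.filter (fun x => decide (pivot < x))

lemma pvLess_length_le (pivot : Int) (rest : List Int) : (pvLess pivot rest).length ≤ rest.length :=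
  List.length_filter_le _ _
lemma pvGreater_length_le (pivot : Int) (rest : List Int) : (pvGreater pivot rest).length ≤ rest.length :=
  List.length_filter_le _ _

def pvQuickSort : List Int → List Int
  | [] => []
  | [x] => [x]
  | pivot :: rest =>
    pvQuickSort (pvLess pivot rest) ++ pivot :: pvQuickSort (pvGreater pivot rest)
termination_by l => l.length
decreasing_by
  · exact Nat.lt_succ_of_le (pvLess_length_le _ _)
  · exact Nat.lt_succ_of_le (pvGreater_length_le _ _)

def inventoryManagement (stock : List Int) (cnt : Int) : List Int :=
  if (stock.length : Int) < cnt ∨ cnt = 0 then []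
  else PySem.List.slice (pvQuickSort stock) none (some cnt)   -- sortStock[:cnt]

-- ===== PORT B =====
def inventoryManagement_alt (stock : List Int) (cnt : Int) : List Int :=
  if (stock.length : Int) < cnt ∨ cnt = 0 then []
  else PySem.List.slice (PySem.List.sorted stock (fun x => x) false) none (some cnt)   -- sorted(stock)[:cnt]

-- ===== PRECONDITION & SPEC =====
def Spec_inventoryManagement (stock : List Int) (cnt : Int) (out : List Int) : Prop := out = inventoryManagement_alt stock cnt
instance (stock : List Int) (cnt : Int) (out : List Int) : Decidable (Spec_inventoryManagement stock cnt out) := by unfold Spec_inventoryManagement; infer_instance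

-- ===== CLAIM (what is proved, stated in full; the proofs are below) =====
def Claim_equal_inventoryManagement : Prop := ∀ (stock : List Int) (cnt : Int), Dom_inventoryManagement stock cnt → Spec_inventoryManagement stock cnt (inventoryManagement stock cnt)

-- ===== LEMMAS AND PROOFS =====

lemma pvQuickSort_perm : ∀ l : List Int, (pvQuickSort l).Perm l := by
  intro l
  induction l using pvQuickSort.induct with
  | case1 => simp [pvQuickSort]
  | case2 x => simp [pvQuickSort]
  | case3 pivot rest hne ihl ihg =>
    rw [pvQuickSort]
    · refine List.Perm.trans (List.Perm.append ihl (List.Perm.cons pivot ihg)) ?_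
      refine List.Perm.trans List.perm_middle (List.Perm.cons pivot ?_)
      rw [pvLess, pvGreater]
      exact List.Perm.trans (List.perm_append_comm)
        (List.filter_append_perm (fun x => decide (pivot < x)) rest)
    · exact hne

lemma pvQuickSort_mem {l : List Int} {x : Int} : x ∈ pvQuickSort l ↔ x ∈ l :=
  (pvQuickSort_perm l).mem_iff

lemma pvQuickSort_pairwise : ∀ l : List Int, (pvQuickSort l).Pairwise (· ≤ ·) := by
  intro l
  induction l using pvQuickSort.induct with
  | case1 => simp [pvQuickSort]
  | case2 x => simp [pvQuickSort]
  | case3 pivot rest hne ihl ihg =>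
    rw [pvQuickSort]
    · rw [List.pairwise_append]
      refine ⟨ihl, List.pairwise_cons.mpr ⟨?_, ihg⟩, ?_⟩
      · intro y hy
        have hm := List.of_mem_filter (pvQuickSort_mem.mp hy)
        simp at hm
        omega
      · intro y hy z hz
        have hyl := List.of_mem_filter (pvQuickSort_mem.mp hy)
        simp at hyl
        rcases List.mem_cons.mp hz with h | h
        · omega
        · have hzg := List.of_mem_filter (pvQuickSort_mem.mp h)
          simp at hzg
          omega
    · exact hne

lemma pvQuickSort_eq_sorted (l : List Int) :
    pvQuickSort l = PySem.List.sorted l (fun x => x) false :=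
  (PySem.List.sorted_id_eq_of_perm_of_pairwise l (pvQuickSort l)
    (pvQuickSort_perm l) (pvQuickSort_pairwise l)).symm

-- ===== VERDICT (by name: the statement is the Claim_ definition above) =====
theorem inventoryManagement_spec : Claim_equal_inventoryManagement := by
  intro stock cnt _
  unfold Spec_inventoryManagement inventoryManagement inventoryManagement_alt
  rw [pvQuickSort_eq_sorted]
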